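-- pv_equiv track=rewrite | github.com/AdventCode21/advent | lida/day3/d3.py | d3_p1
-- ===== SOURCE A (Python) =====
-- from collections import defaultdict
--
-- def d3_p1(data):
--     digits = defaultdict(lambda: [0, 0])
--
--     for line in data:
--         for i in range(len(line)):
--             if line[i] == "0":
--                 digits[i][0] += 1
--             elif line[i] == "1":
--                 digits[i][1] += 1
--     gamma = ""
--     epsilon = ""
--     for digit in range(len(digits)):
--         if digits[digit][0] > digits[digit][1]:
--             gamma += "0"
--             epsilon += "1"
--         else:
--             gamma += "1"
--             epsilon += "0"
--
--     return int(gamma, 2) * int(epsilon, 2)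
-- ===== SOURCE B (Python) =====
-- def d3_p1(data):
--     width = max(map(len, data), default=0)
--     gamma = ""
--     epsilon = ""
--     for i in range(width):
--         column = [line[i] for line in data if i < len(line)]
--         if column.count("0") > column.count("1"):
--             gamma += "0"
--             epsilon += "1"
--         else:
--             gamma += "1"
--             epsilon += "0"
--     return int(gamma, 2) * int(epsilon, 2)
-- ===== Notes on version B (the rewrite author's own statement) =====
-- stated objective: idiomatic
-- what changed: B makes a column-major pass up to the maximum line width, counting zeros and ones per column, instead of A's row-major accumulation into a defaultdict of per-column counters; Pre_ restricts to inputs where every column below the max width holds a '0'/'1' in some line, or no column has a '0'-majority (both products 0) -- it excludes inputs where a digit-free column coexists with a zero-majority column, where A's bit-width len(digits) is an accident of the defaultdict, and inputs with no binary digit anywhere, where both raise ValueError from int('', 2).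
-- outside the precondition, e.g. on d3_p1(['1a0']): A returns 0, B returns 6
import Mathlib
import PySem

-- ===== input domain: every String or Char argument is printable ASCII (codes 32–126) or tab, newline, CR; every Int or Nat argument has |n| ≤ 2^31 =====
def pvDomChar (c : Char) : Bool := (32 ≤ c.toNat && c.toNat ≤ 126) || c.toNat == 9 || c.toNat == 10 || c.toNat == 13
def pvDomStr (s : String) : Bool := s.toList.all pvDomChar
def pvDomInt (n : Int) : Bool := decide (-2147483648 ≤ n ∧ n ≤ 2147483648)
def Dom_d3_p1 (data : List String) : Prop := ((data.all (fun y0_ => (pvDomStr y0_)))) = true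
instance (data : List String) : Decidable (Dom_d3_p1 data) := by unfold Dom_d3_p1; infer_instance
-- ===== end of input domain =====

-- B scans column-major up to the maximum line width, counting zeros and ones per
-- column, instead of A's row-major defaultdict of counters; same value on Pre_ (idiomatic).


-- ===== PORT A =====
-- inner loop body of A: 'for i in range(len(line)): if line[i]=="0": digits[i][0]+=1 elif …'
def d3A_line (d : PySem.Dict Int (Int × Int)) (line : String) : PySem.Dict Int (Int × Int) :=
  (PySem.List.pyRange 0 (PySem.Str.len line) 1).foldl (fun d i =>
    if PySem.Str.pyGet? line i = some '0' then d.modify i (0, 0) (fun v => (v.1 + 1, v.2))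
    else if PySem.Str.pyGet? line i = some '1' then d.modify i (0, 0) (fun v => (v.1, v.2 + 1))
    else d) d

def d3A_fill (data : List String) : PySem.Dict Int (Int × Int) :=
  data.foldl d3A_line PySem.Dict.empty

def d3_p1 (data : List String) : Int :=
  let digits := d3A_fill data
  let ge := (PySem.List.pyRange 0 (digits.size : Int) 1).foldl
    (fun (p : List Char × List Char) digit =>
      let v := digits.getD digit (0, 0)   -- defaultdict read: missing key yields [0,0]
      if v.1 > v.2 then (p.1 ++ ['0'], p.2 ++ ['1']) else (p.1 ++ ['1'], p.2 ++ ['0']))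
    ([], [])
  -- int(gamma, 2) * int(epsilon, 2); none = ValueError on the empty string, excluded
  -- by Pre_ (the .getD 0 there is an arbitrary total-function value, never A's result)
  (PySem.Int.ofCharsBase? ge.1 2).getD 0 * (PySem.Int.ofCharsBase? ge.2 2).getD 0

-- ===== PORT B =====
-- [line[i] for line in data if i < len(line)]
def d3B_col (data : List String) (i : Int) : List Char :=
  data.filterMap (fun line =>
    if i < PySem.Str.len line then PySem.Str.pyGet? line i else none)

def d3_p1_alt (data : List String) : Int :=
  let width := PySem.List.maxD (data.map (fun line => PySem.Str.len line)) (fun x => x) 0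
  let ge := (PySem.List.pyRange 0 width 1).foldl
    (fun (p : List Char × List Char) i =>
      let column := d3B_col data i
      if PySem.List.count column '0' > PySem.List.count column '1'
      then (p.1 ++ ['0'], p.2 ++ ['1']) else (p.1 ++ ['1'], p.2 ++ ['0']))
    ([], [])
  -- int(gamma, 2) * int(epsilon, 2); none = ValueError on the empty string, excluded
  -- by Pre_ (the .getD 0 there is an arbitrary total-function value, never B's result)
  (PySem.Int.ofCharsBase? ge.1 2).getD 0 * (PySem.Int.ofCharsBase? ge.2 2).getD 0

-- ===== PRECONDITION & SPEC =====
-- column/width descriptors of the input (used by Pre_ and the proofs)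
def pvCZ (line : String) (i : Int) : Int :=
  if PySem.Str.pyGet? line i = some '0' then 1 else 0
def pvCO (line : String) (i : Int) : Int :=
  if PySem.Str.pyGet? line i = some '1' then 1 else 0
def pvZeros (data : List String) (i : Int) : Int := (data.map (fun line => pvCZ line i)).sum
def pvOnes (data : List String) (i : Int) : Int := (data.map (fun line => pvCO line i)).sum
def pvWidth (data : List String) : Int :=
  PySem.List.maxD (data.map (fun line => PySem.Str.len line)) (fun x => x) 0

-- Pre_ asks that some binary digit appear somewhere and that either every column index below the
-- maximum line width hold a '0' or '1' in at least one line (true of any table of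
-- binary digits, ragged or not), or no column hold more '0's than '1's (then both
-- epsilons are all-'0' strings and both products are 0). It excludes inputs where a
-- column with no binary digit coexists with a zero-majority column — there A's
-- bit-width len(digits) counts only the columns that happen to hold a '0'/'1', an
-- accident of the defaultdict — and inputs with no binary digit anywhere, where
-- both programs raise ValueError from int('', 2).
def Pre_d3_p1 (data : List String) : Prop :=
  (data.any (fun line => line.toList.any (fun c => c == '0' || c == '1'))) = true ∧
  (((PySem.List.pyRange 0 (pvWidth data) 1).all (fun i => data.any (fun line =>
      decide (PySem.Str.pyGet? line i = some '0' ∨ PySem.Str.pyGet? line i = some '1')))) = true ∨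
   ((PySem.List.pyRange 0 (pvWidth data) 1).all (fun i =>
      decide (pvZeros data i ≤ pvOnes data i))) = true)
instance (data : List String) : Decidable (Pre_d3_p1 data) := by unfold Pre_d3_p1; infer_instance

def pvWitness_d3_p1 : List String := (["01", "10"])

def Spec_d3_p1 (data : List String) (out : Int) : Prop := out = d3_p1_alt data
instance (data : List String) (out : Int) : Decidable (Spec_d3_p1 data out) := by unfold Spec_d3_p1; infer_instance

-- ===== CLAIM (what is proved, stated in full; the proofs are below) =====
def Claim_equal_d3_p1 : Prop := ∀ (data : List String), Dom_d3_p1 data → Pre_d3_p1 data → Spec_d3_p1 data (d3_p1 data)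

-- ===== LEMMAS AND PROOFS =====

lemma d3A_line_foldl_getD (line : String) (L : List Int) (hL : L.Nodup)
    (d : PySem.Dict Int (Int × Int)) (i : Int) :
    ((L.foldl (fun d j =>
        if PySem.Str.pyGet? line j = some '0' then d.modify j (0, 0) (fun v => (v.1 + 1, v.2))
        else if PySem.Str.pyGet? line j = some '1' then d.modify j (0, 0) (fun v => (v.1, v.2 + 1))
        else d) d).getD i (0, 0)) =
      if i ∈ L then ((d.getD i (0, 0)).1 + pvCZ line i, (d.getD i (0, 0)).2 + pvCO line i)
      else d.getD i (0, 0) := by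
  induction L generalizing d with
  | nil => simp
  | cons j tl ih =>
    simp only [List.nodup_cons] at hL
    rw [List.foldl_cons, ih hL.2]
    by_cases hij : i = j
    · subst hij
      simp only [List.mem_cons, true_or, if_pos, hL.1, if_false]
      by_cases h0 : PySem.List.pyGet? line.toList i = some '0'
      · simp [h0, pysem, pvCZ, pvCO]
      · by_cases h1 : PySem.List.pyGet? line.toList i = some '1'
        · simp [h1, pysem, pvCZ, pvCO]
        · simp [h0, h1, pvCZ, pvCO]
    · have hmem : (i ∈ j :: tl) ↔ (i ∈ tl) := by simp [List.mem_cons, hij]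
      rw [if_congr hmem rfl rfl]
      have hstep :
          ((if PySem.Str.pyGet? line j = some '0' then d.modify j (0, 0) (fun v => (v.1 + 1, v.2))
            else if PySem.Str.pyGet? line j = some '1' then d.modify j (0, 0) (fun v => (v.1, v.2 + 1))
            else d).getD i (0, 0)) = d.getD i (0, 0) := by
        split_ifs with h0 h1
        · rw [PySem.Dict.getD_modify_of_ne _ _ _ hij]
        · rw [PySem.Dict.getD_modify_of_ne _ _ _ hij]
        · rfl
      rw [hstep]

lemma pyGet?_none_of_ge (line : String) (i : Int) (hi : 0 ≤ i)
    (h : (PySem.Str.len line : Int) ≤ i) : PySem.List.pyGet? line.toList i = none := by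
  rw [PySem.List.pyGet?_of_nonneg _ hi]
  simp only [PySem.Str.len_eq] at h
  apply List.getElem?_eq_none
  omega

lemma d3A_line_getD (line : String) (d : PySem.Dict Int (Int × Int)) (i : Int) (hi : 0 ≤ i) :
    (d3A_line d line).getD i (0, 0) =
      ((d.getD i (0, 0)).1 + pvCZ line i, (d.getD i (0, 0)).2 + pvCO line i) := by
  unfold d3A_line
  rw [d3A_line_foldl_getD line _ (by simpa using PySem.List.nodup_pyRange_one 0 (PySem.Str.len line)) d i]
  by_cases hmem : i ∈ PySem.List.pyRange 0 (PySem.Str.len line) 1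
  · rw [if_pos hmem]
  · rw [if_neg hmem]
    rw [PySem.List.mem_pyRange_one] at hmem
    have hge : (PySem.Str.len line : Int) ≤ i := by omega
    have hnone : PySem.List.pyGet? line.toList i = none := pyGet?_none_of_ge line i hi hge
    simp [pvCZ, pvCO, hnone]

lemma d3A_fill_foldl_getD (data : List String) (d : PySem.Dict Int (Int × Int)) (i : Int)
    (hi : 0 ≤ i) :
    (data.foldl d3A_line d).getD i (0, 0) =
      ((d.getD i (0, 0)).1 + pvZeros data i, (d.getD i (0, 0)).2 + pvOnes data i) := by
  induction data generalizing d with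
  | nil => simp [pvZeros, pvOnes]
  | cons line rest ih =>
    rw [List.foldl_cons, ih (d3A_line d line)]
    rw [d3A_line_getD line d i hi]
    simp [pvZeros, pvOnes]
    constructor <;> ring

lemma d3A_fill_getD (data : List String) (i : Int) (hi : 0 ≤ i) :
    (d3A_fill data).getD i (0, 0) = (pvZeros data i, pvOnes data i) := by
  unfold d3A_fill
  rw [d3A_fill_foldl_getD data PySem.Dict.empty i hi]
  simp [PySem.Dict.getD_empty]

-- key-set membership, line level (arbitrary index list)
lemma mem_keys_d3A_line_foldl (line : String) (L : List Int)
    (d : PySem.Dict Int (Int × Int)) (i : Int) :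
    (i ∈ (L.foldl (fun d j =>
        if PySem.Str.pyGet? line j = some '0' then d.modify j (0, 0) (fun v => (v.1 + 1, v.2))
        else if PySem.Str.pyGet? line j = some '1' then d.modify j (0, 0) (fun v => (v.1, v.2 + 1))
        else d) d).keys) ↔
      i ∈ d.keys ∨ (i ∈ L ∧ (PySem.Str.pyGet? line i = some '0' ∨ PySem.Str.pyGet? line i = some '1')) := by
  induction L generalizing d with
  | nil => simp
  | cons j tl ih =>
    rw [List.foldl_cons, ih]
    have hstep : (i ∈ (if PySem.Str.pyGet? line j = some '0' then d.modify j (0, 0) (fun v => (v.1 + 1, v.2))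
            else if PySem.Str.pyGet? line j = some '1' then d.modify j (0, 0) (fun v => (v.1, v.2 + 1))
            else d).keys) ↔
        i ∈ d.keys ∨ (i = j ∧ (PySem.Str.pyGet? line i = some '0' ∨ PySem.Str.pyGet? line i = some '1')) := by
      by_cases hij : i = j
      · subst hij
        split_ifs with h0 h1 <;>
          simp_all [PySem.Dict.keys_modify, PySem.Dict.mem_keys_insert]
      · split_ifs with h0 h1 <;>
          simp_all [PySem.Dict.keys_modify, PySem.Dict.mem_keys_insert]
    rw [hstep]
    simp only [List.mem_cons]
    tauto

lemma d3A_line_keys_iff (line : String) (d : PySem.Dict Int (Int × Int)) (i : Int) :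
    i ∈ (d3A_line d line).keys ↔
      i ∈ d.keys ∨ (0 ≤ i ∧ (PySem.Str.pyGet? line i = some '0' ∨ PySem.Str.pyGet? line i = some '1')) := by
  unfold d3A_line
  rw [mem_keys_d3A_line_foldl]
  have hiff : (i ∈ PySem.List.pyRange 0 (PySem.Str.len line) 1 ∧
      (PySem.Str.pyGet? line i = some '0' ∨ PySem.Str.pyGet? line i = some '1')) ↔
      (0 ≤ i ∧ (PySem.Str.pyGet? line i = some '0' ∨ PySem.Str.pyGet? line i = some '1')) := by
    rw [PySem.List.mem_pyRange_one]
    constructor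
    · rintro ⟨⟨h0, _⟩, hc⟩; exact ⟨h0, hc⟩
    · rintro ⟨h0, hc⟩
      refine ⟨⟨h0, ?_⟩, hc⟩
      by_contra hge
      rw [Int.not_lt] at hge
      have hnone := pyGet?_none_of_ge line i h0 hge
      simp only [PySem.Str.pyGet?_eq, PySem.Chars.pyGet?_eq_listPyGet?] at hc
      rcases hc with hc | hc <;> rw [hnone] at hc <;> simp at hc
  rw [hiff]

lemma nodup_keys_d3A_line (line : String) (d : PySem.Dict Int (Int × Int))
    (h : d.keys.Nodup) : (d3A_line d line).keys.Nodup := by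
  unfold d3A_line
  generalize PySem.List.pyRange 0 (PySem.Str.len line) 1 = L
  induction L generalizing d with
  | nil => simpa
  | cons j tl ih =>
    rw [List.foldl_cons]
    apply ih
    split_ifs with h0 h1
    · rw [PySem.Dict.keys_modify]; exact PySem.Dict.nodup_keys_insert _ _ _ h
    · rw [PySem.Dict.keys_modify]; exact PySem.Dict.nodup_keys_insert _ _ _ h
    · exact h

lemma nodup_keys_d3A_fill (data : List String) : (d3A_fill data).keys.Nodup := by
  unfold d3A_fill
  have main : ∀ d : PySem.Dict Int (Int × Int), d.keys.Nodup →
      (data.foldl d3A_line d).keys.Nodup := by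
    induction data with
    | nil => intro d h; simpa
    | cons line rest ih =>
      intro d h
      rw [List.foldl_cons]
      exact ih _ (nodup_keys_d3A_line line d h)
  exact main _ PySem.Dict.nodup_keys_empty

lemma mem_keys_d3A_fill (data : List String) (i : Int) :
    i ∈ (d3A_fill data).keys ↔
      0 ≤ i ∧ ∃ line ∈ data, PySem.Str.pyGet? line i = some '0' ∨ PySem.Str.pyGet? line i = some '1' := by
  unfold d3A_fill
  have main : ∀ d : PySem.Dict Int (Int × Int),
      (i ∈ (data.foldl d3A_line d).keys ↔
        i ∈ d.keys ∨ (0 ≤ i ∧ ∃ line ∈ data,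
          PySem.Str.pyGet? line i = some '0' ∨ PySem.Str.pyGet? line i = some '1')) := by
    induction data with
    | nil => simp
    | cons line rest ih =>
      intro d
      rw [List.foldl_cons, ih, d3A_line_keys_iff]
      simp only [List.mem_cons]
      constructor
      · rintro ((h | h) | ⟨h0, l, hl, hc⟩)
        · tauto
        · exact Or.inr ⟨h.1, line, Or.inl rfl, h.2⟩
        · exact Or.inr ⟨h0, l, Or.inr hl, hc⟩
      · rintro (h | ⟨h0, l, (rfl | hl), hc⟩)
        · tauto
        · exact Or.inl (Or.inr ⟨h0, hc⟩)
        · exact Or.inr ⟨h0, l, hl, hc⟩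
  rw [main]
  simp

-- B-side: the column comprehension's counts are the per-line indicator sums
lemma count_d3B_col (data : List String) (i : Int) (hi : 0 ≤ i) (c : Char) :
    (PySem.List.count (d3B_col data i) c : Int) =
      (data.map (fun line => if PySem.Str.pyGet? line i = some c then (1 : Int) else 0)).sum := by
  unfold d3B_col
  induction data with
  | nil => simp [PySem.List.count]
  | cons line rest ih =>
    by_cases hlt : i < PySem.Str.len line
    · have hsome : ∃ ch, PySem.Str.pyGet? line i = some ch := by
        simp only [PySem.Str.pyGet?_eq, PySem.Chars.pyGet?_eq_listPyGet?]
        rw [PySem.List.pyGet?_of_nonneg _ hi]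
        simp only [PySem.Str.len_eq] at hlt
        exact ⟨line.toList[i.toNat]'(by omega), List.getElem?_eq_getElem (by omega)⟩
      obtain ⟨ch, hch⟩ := hsome
      simp only [List.filterMap_cons, if_pos hlt, hch, List.map_cons, List.sum_cons,
        PySem.List.count_eq, List.count_cons] at ih ⊢
      by_cases hcc : ch = c
      · subst hcc
        simp only [beq_self_eq_true, if_true]
        push_cast
        omega
      · have h1 : ¬ (some ch = some c) := by simpa using hcc
        simp only [h1, if_false, beq_iff_eq, hcc]
        push_cast
        omega
    · have hnone : PySem.Str.pyGet? line i = none := by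
        simp only [PySem.Str.pyGet?_eq, PySem.Chars.pyGet?_eq_listPyGet?]
        exact pyGet?_none_of_ge line i hi (by omega)
      simp only [List.filterMap_cons, if_neg hlt, hnone, List.map_cons, List.sum_cons] at ih ⊢
      simpa using ih

-- width = max line length; under Pre_, i < width ↔ some line reaches column i
lemma lt_width_iff (data : List String) (i : Int) :
    (i < pvWidth data) ↔
      (data = [] ∧ i < 0) ∨ ∃ line ∈ data, i < PySem.Str.len line := by
  unfold pvWidth PySem.List.maxD
  cases hdata : data with
  | nil => simp [PySem.List.max?]
  | cons l t =>
    have hne : ((l :: t).map (fun line => PySem.Str.len line)) ≠ [] := by simp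
    cases hmax : PySem.List.max? ((l :: t).map (fun line => PySem.Str.len line)) (fun x => x) with
    | none => exact absurd ((PySem.List.max?_eq_none_iff _ _).mp hmax) hne
    | some m =>
      have hmem := PySem.List.max?_mem hmax
      have hmaxle := PySem.List.max?_isMax hmax
      simp only [Option.getD_some]
      constructor
      · intro him
        rcases List.mem_map.mp hmem with ⟨line, hline, rfl⟩
        exact Or.inr ⟨line, hline, him⟩
      · rintro (⟨h, _⟩ | ⟨line, hline, hlen⟩)
        · simp at h
        · have : PySem.Str.len line ≤ m :=
            hmaxle _ (List.mem_map.mpr ⟨line, hline, rfl⟩)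
          omega

lemma width_nonneg (data : List String) : 0 ≤ pvWidth data := by
  unfold pvWidth PySem.List.maxD
  cases hmax : PySem.List.max? (data.map (fun line => PySem.Str.len line)) (fun x => x) with
  | none => simp
  | some m =>
    have hmem := PySem.List.max?_mem hmax
    rcases List.mem_map.mp hmem with ⟨line, _, rfl⟩
    simp [PySem.Str.len_eq]

-- int('0'*(n+1), 2) = 0: the trimmed string is itself, and the digit fold of all
-- zeros accumulates 0 (one parser step is definitional once two characters are explicit)
lemma trim_zeros (k : Nat) :
    (List.dropWhile PySem.Int.isIntSpace
       (List.dropWhile PySem.Int.isIntSpace (List.replicate k '0')).reverse).reverse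
      = List.replicate k '0' := by
  simp [PySem.Int.isIntSpace]

lemma zeros_parse (n : Nat) :
    PySem.Int.ofCharsBase? (List.replicate (n+1) '0') 2 = some 0 := by
  induction n with
  | zero => decide
  | succ m ih =>
    have step : PySem.Int.ofCharsBase? (List.replicate (m+2) '0') 2
        = PySem.Int.ofCharsBase? (List.replicate (m+1) '0') 2 := by
      cases m with
      | zero => decide
      | succ m' =>
        simp only [PySem.Int.ofCharsBase?, trim_zeros]
        simp only [List.replicate_succ]
        rfl
    rw [step, ih]

-- A's emission loop when no column has a '0'-majority: gamma all '1', epsilon all '0'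
lemma foldl_bits_all_ones_A (d : PySem.Dict Int (Int × Int)) (L : List Int)
    (h : ∀ x ∈ L, ¬ ((d.getD x (0, 0)).1 > (d.getD x (0, 0)).2)) (acc : List Char × List Char) :
    L.foldl (fun (p : List Char × List Char) digit =>
        let v := d.getD digit (0, 0)
        if v.1 > v.2 then (p.1 ++ ['0'], p.2 ++ ['1']) else (p.1 ++ ['1'], p.2 ++ ['0'])) acc
      = (acc.1 ++ List.replicate L.length '1', acc.2 ++ List.replicate L.length '0') := by
  induction L generalizing acc with
  | nil => simp
  | cons x t ih =>
    rw [List.foldl_cons]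
    have hx := h x (List.mem_cons_self)
    simp only [if_neg hx]
    rw [ih (fun y hy => h y (List.mem_cons_of_mem x hy))]
    simp [List.replicate_succ, List.append_assoc]

-- B's emission loop in the same situation
lemma foldl_bits_all_ones_B (data : List String) (L : List Int)
    (h : ∀ x ∈ L, ¬ (PySem.List.count (d3B_col data x) '0' > PySem.List.count (d3B_col data x) '1'))
    (acc : List Char × List Char) :
    L.foldl (fun (p : List Char × List Char) i =>
        let column := d3B_col data i
        if PySem.List.count column '0' > PySem.List.count column '1'
        then (p.1 ++ ['0'], p.2 ++ ['1']) else (p.1 ++ ['1'], p.2 ++ ['0'])) acc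
      = (acc.1 ++ List.replicate L.length '1', acc.2 ++ List.replicate L.length '0') := by
  induction L generalizing acc with
  | nil => simp
  | cons x t ih =>
    rw [List.foldl_cons]
    have hx := h x (List.mem_cons_self)
    simp only [if_neg hx]
    rw [ih (fun y hy => h y (List.mem_cons_of_mem x hy))]
    simp [List.replicate_succ, List.append_assoc]

-- product of the two parsed all-same strings is 0 (epsilon parses to 0, or both to none)
lemma prod_ones_zeros (n : Nat) :
    (PySem.Int.ofCharsBase? (List.replicate n '1') 2).getD 0 *
      (PySem.Int.ofCharsBase? (List.replicate n '0') 2).getD 0 = 0 := by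
  cases n with
  | zero => decide
  | succ m => rw [zeros_parse m]; simp

-- ===== VERDICT (by name: the statement is the Claim_ definition above) =====
theorem d3_p1_spec : Claim_equal_d3_p1 := by
  intro data _ hpre
  unfold Spec_d3_p1
  obtain ⟨_, hdis⟩ := hpre
  set W := pvWidth data with hW
  have hW0 : 0 ≤ W := width_nonneg data
  have hsub : ∀ i : Int, i ∈ (d3A_fill data).keys → (0 ≤ i ∧ i < W) := by
    intro i hi
    rw [mem_keys_d3A_fill] at hi
    obtain ⟨h0, line, hline, hc⟩ := hi
    refine ⟨h0, (lt_width_iff data i).mpr (Or.inr ⟨line, hline, ?_⟩)⟩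
    by_contra hge
    rw [Int.not_lt] at hge
    have hnone := pyGet?_none_of_ge line i h0 hge
    simp only [PySem.Str.pyGet?_eq, PySem.Chars.pyGet?_eq_listPyGet?] at hc
    rcases hc with hc | hc <;> rw [hnone] at hc <;> simp at hc
  have hcount : ∀ x : Int, 0 ≤ x →
      ((PySem.List.count (d3B_col data x) '0' : Int) = pvZeros data x ∧
       (PySem.List.count (d3B_col data x) '1' : Int) = pvOnes data x) := by
    intro x hx0
    constructor
    · rw [count_d3B_col data x hx0 '0']; simp [pvZeros, pvCZ]
    · rw [count_d3B_col data x hx0 '1']; simp [pvOnes, pvCO]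
  rcases hdis with hcols | hle
  · -- every column below the width holds a binary digit: the dict has one key per column
    simp only [List.all_eq_true] at hcols
    have hkeys : ∀ i : Int, i ∈ (d3A_fill data).keys ↔ (0 ≤ i ∧ i < W) := by
      intro i
      constructor
      · exact hsub i
      · rintro ⟨h0, hiW⟩
        have hmem : i ∈ PySem.List.pyRange 0 W 1 := PySem.List.mem_pyRange_one.mpr ⟨h0, hiW⟩
        have := hcols i hmem
        simp only [List.any_eq_true, decide_eq_true_eq] at this
        obtain ⟨line, hline, hc⟩ := this
        exact (mem_keys_d3A_fill data i).mpr ⟨h0, line, hline, hc⟩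
    have hperm : (d3A_fill data).keys.Perm (PySem.List.pyRange 0 W 1) := by
      rw [List.perm_ext_iff_of_nodup (nodup_keys_d3A_fill data)
        (by simpa using PySem.List.nodup_pyRange_one 0 W)]
      intro a
      rw [hkeys, PySem.List.mem_pyRange_one]
    have hsize : ((d3A_fill data).size : Int) = W := by
      have h1 : (d3A_fill data).keys.length = (PySem.List.pyRange 0 W 1).length := hperm.length_eq
      have h2 : (PySem.List.pyRange 0 W 1).length = (W - 0).toNat := PySem.List.length_pyRange_one 0 W
      have h3 : (d3A_fill data).keys.length = (d3A_fill data).size := by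
        simp [PySem.Dict.keys, PySem.Dict.size]
      omega
    show _ = d3_p1_alt data
    unfold d3_p1 d3_p1_alt
    have hMW : PySem.List.maxD (data.map (fun line => PySem.Str.len line)) (fun x => x) 0 = W :=
      hW.symm
    simp only [hsize, hMW]
    have hfold :
        (PySem.List.pyRange 0 W 1).foldl
          (fun (p : List Char × List Char) digit =>
            let v := (d3A_fill data).getD digit (0, 0)
            if v.1 > v.2 then (p.1 ++ ['0'], p.2 ++ ['1']) else (p.1 ++ ['1'], p.2 ++ ['0'])) ([], []) =
        (PySem.List.pyRange 0 W 1).foldl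
          (fun (p : List Char × List Char) i =>
            let column := d3B_col data i
            if PySem.List.count column '0' > PySem.List.count column '1'
            then (p.1 ++ ['0'], p.2 ++ ['1']) else (p.1 ++ ['1'], p.2 ++ ['0'])) ([], []) := by
      apply PySem.List.foldl_congr_mem
      intro acc x hx
      have hx0 : 0 ≤ x := (PySem.List.mem_pyRange_one.mp hx).1
      obtain ⟨h0, h1⟩ := hcount x hx0
      have hiff : (PySem.List.count (d3B_col data x) '1' < PySem.List.count (d3B_col data x) '0') ↔
          (pvOnes data x < pvZeros data x) := by
        rw [← h0, ← h1]; exact_mod_cast Iff.rfl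
      rw [d3A_fill_getD data x hx0]
      simp only [gt_iff_lt]
      by_cases hc : pvOnes data x < pvZeros data x
      · rw [if_pos hc, if_pos (hiff.mpr hc)]
      · rw [if_neg hc, if_neg (fun h => hc (hiff.mp h))]
    rw [hfold]
  · -- no column has a '0'-majority: both gammas are all-'1', both epsilons all-'0',
    -- and both products are 0
    simp only [List.all_eq_true, decide_eq_true_eq] at hle
    have hleW : ∀ i : Int, 0 ≤ i → i < W → pvZeros data i ≤ pvOnes data i := by
      intro i h0 hiW
      exact hle i (PySem.List.mem_pyRange_one.mpr ⟨h0, hiW⟩)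
    have hA : d3_p1 data = 0 := by
      unfold d3_p1
      have hall : ∀ x ∈ PySem.List.pyRange 0 ((d3A_fill data).size : Int) 1,
          ¬ (((d3A_fill data).getD x (0, 0)).1 > ((d3A_fill data).getD x (0, 0)).2) := by
        intro x hx
        have hx0 : 0 ≤ x := (PySem.List.mem_pyRange_one.mp hx).1
        rw [d3A_fill_getD data x hx0]
        simp only [gt_iff_lt, not_lt]
        by_cases hxW : x < W
        · exact hleW x hx0 hxW
        · -- column at or beyond the width: both counts are 0
          rw [Int.not_lt] at hxW
          have hz : pvZeros data x = 0 := by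
            unfold pvZeros
            have : ∀ line ∈ data, pvCZ line x = 0 := by
              intro line hline
              unfold pvCZ
              have hlen : (PySem.Str.len line : Int) ≤ x := by
                by_contra hlt
                rw [not_le] at hlt
                have : x < W := (lt_width_iff data x).mpr (Or.inr ⟨line, hline, hlt⟩)
                omega
              have hnone := pyGet?_none_of_ge line x hx0 hlen
              simp [PySem.Str.pyGet?_eq, PySem.Chars.pyGet?_eq_listPyGet?, hnone]
            calc (data.map (fun line => pvCZ line x)).sum
                = (data.map (fun _ => (0 : Int))).sum := by
                  apply congrArg
                  exact List.map_congr_left this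
              _ = 0 := by simp
          have ho : pvOnes data x = 0 := by
            unfold pvOnes
            have : ∀ line ∈ data, pvCO line x = 0 := by
              intro line hline
              unfold pvCO
              have hlen : (PySem.Str.len line : Int) ≤ x := by
                by_contra hlt
                rw [not_le] at hlt
                have : x < W := (lt_width_iff data x).mpr (Or.inr ⟨line, hline, hlt⟩)
                omega
              have hnone := pyGet?_none_of_ge line x hx0 hlen
              simp [PySem.Str.pyGet?_eq, PySem.Chars.pyGet?_eq_listPyGet?, hnone]
            calc (data.map (fun line => pvCO line x)).sum
                = (data.map (fun _ => (0 : Int))).sum := by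
                  apply congrArg
                  exact List.map_congr_left this
              _ = 0 := by simp
          omega
      have hfoldA := foldl_bits_all_ones_A (d3A_fill data) _ hall ([], [])
      simp only [hfoldA, List.nil_append, PySem.List.length_pyRange_one]
      exact prod_ones_zeros _
    have hB : d3_p1_alt data = 0 := by
      unfold d3_p1_alt
      have hall : ∀ x ∈ PySem.List.pyRange 0
            (PySem.List.maxD (data.map (fun line => PySem.Str.len line)) (fun x => x) 0) 1,
          ¬ (PySem.List.count (d3B_col data x) '0' > PySem.List.count (d3B_col data x) '1') := by
        intro x hx
        have hx0 : 0 ≤ x := (PySem.List.mem_pyRange_one.mp hx).1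
        have hxW : x < W := (PySem.List.mem_pyRange_one.mp hx).2
        obtain ⟨h0, h1⟩ := hcount x hx0
        simp only [gt_iff_lt, not_lt]
        have := hleW x hx0 hxW
        omega
      have hfoldB := foldl_bits_all_ones_B data _ hall ([], [])
      simp only [hfoldB, List.nil_append, PySem.List.length_pyRange_one]
      exact prod_ones_zeros _
    rw [hA, hB]
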